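-- pv_equiv track=rewrite | github.com/AHVijay/LeetCode-Solutions | Python/Medium/Medium_Python_Solns.py | findMinimumValue
-- ===== SOURCE A (Python) =====
-- def findMinimumValue(n, a):
--     product = 1
--     for i in a:
--         product *= i
--     x = 1
--     while x ** n <= product:
--         x += 1
--     return x
-- ===== SOURCE B (Python) =====
-- def findMinimumValue(n, a):
--     product = 1
--     for v in a:
--         product *= v
--     if product < 1:
--         return 1
--     hi = 2
--     while hi ** n <= product:
--         hi *= 2
--     lo = 1
--     while lo < hi:
--         mid = (lo + hi) // 2
--         if mid ** n <= product:
--             lo = mid + 1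
--         else:
--             hi = mid
--     return lo
-- ===== Notes on version B (the rewrite author's own statement) =====
-- stated objective: alternative
-- what changed: Replaces A's linear scan x=1,2,3,... with exponential doubling of an upper bound followed by binary search for the least x with x**n > product.
import Mathlib
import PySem

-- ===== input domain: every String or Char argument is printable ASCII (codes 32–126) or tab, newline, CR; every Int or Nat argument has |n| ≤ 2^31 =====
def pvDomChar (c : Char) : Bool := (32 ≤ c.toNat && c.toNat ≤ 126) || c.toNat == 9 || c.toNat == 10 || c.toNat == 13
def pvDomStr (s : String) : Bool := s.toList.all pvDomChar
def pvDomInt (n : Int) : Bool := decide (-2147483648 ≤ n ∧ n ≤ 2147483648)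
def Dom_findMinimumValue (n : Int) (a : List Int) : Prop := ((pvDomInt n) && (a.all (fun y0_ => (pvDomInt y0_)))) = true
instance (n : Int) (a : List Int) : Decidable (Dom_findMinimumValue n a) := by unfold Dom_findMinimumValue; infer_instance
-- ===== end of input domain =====

-- B replaces A's linear scan for the least x with x**n > product by doubling + binary search (alternative algorithm).


-- ===== PORT A =====
-- A's while-loop; fuel only makes it total (inside Pre_ the fuel is never exhausted).
def loopA (m : Nat) (product x : Int) : Nat → Int
  | 0 => x
  | fuel+1 => if x ^ m ≤ product then loopA m product (x + 1) fuel else x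

def findMinimumValue (n : Int) (a : List Int) : Int :=
  let product := a.foldl (· * ·) 1
  loopA n.toNat product 1 (product + 2).toNat

-- ===== PORT B =====
-- doubling loop (fuel only for totality)
def growB (m : Nat) (product hi : Int) : Nat → Int
  | 0 => hi
  | fuel+1 => if hi ^ m ≤ product then growB m product (hi * 2) fuel else hi

-- binary-search loop (fuel only for totality)
def bsB (m : Nat) (product : Int) : Nat → Int → Int → Int
  | 0, lo, _ => lo
  | fuel+1, lo, hi =>
    if lo < hi then
      let mid := PySem.Int.floordiv (lo + hi) 2
      if mid ^ m ≤ product then bsB m product fuel (mid + 1) hi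
      else bsB m product fuel lo mid
    else lo

def findMinimumValue_alt (n : Int) (a : List Int) : Int :=
  let product := a.foldl (· * ·) 1
  if product < 1 then 1
  else
    let hi := growB n.toNat product 2 (product + 2).toNat
    bsB n.toNat product (hi - 1).toNat 1 hi

-- ===== PRECONDITION & SPEC =====
-- Pre_ excludes exactly the inputs where A never returns: n ≤ 0 together with a positive
-- product makes A's while-condition hold forever (x**n ≤ 1 never exceeds product).
def Pre_findMinimumValue (n : Int) (a : List Int) : Prop :=
  1 ≤ n ∨ a.foldl (· * ·) 1 < 1
instance (n : Int) (a : List Int) : Decidable (Pre_findMinimumValue n a) := by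
  unfold Pre_findMinimumValue; infer_instance

def pvWitness_findMinimumValue : Int × List Int := (2, [5, 5])

def Spec_findMinimumValue (n : Int) (a : List Int) (out : Int) : Prop := out = findMinimumValue_alt n a
instance (n : Int) (a : List Int) (out : Int) : Decidable (Spec_findMinimumValue n a out) := by
  unfold Spec_findMinimumValue; infer_instance

-- ===== CLAIM (what is proved, stated in full; the proofs are below) =====
def Claim_equal_findMinimumValue : Prop := ∀ (n : Int) (a : List Int), Dom_findMinimumValue n a → Pre_findMinimumValue n a → Spec_findMinimumValue n a (findMinimumValue n a)

-- ===== LEMMAS AND PROOFS =====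

-- characterisation both loops satisfy: least x ≥ 1 with product < x^m
def LeastExceed (m : Nat) (p r : Int) : Prop :=
  1 ≤ r ∧ p < r ^ m ∧ ∀ y : Int, 1 ≤ y → y < r → y ^ m ≤ p

theorem leastExceed_unique (m : Nat) (p r₁ r₂ : Int)
    (h₁ : LeastExceed m p r₁) (h₂ : LeastExceed m p r₂) : r₁ = r₂ := by
  rcases h₁ with ⟨a1, b1, c1⟩
  rcases h₂ with ⟨a2, b2, c2⟩
  rcases lt_trichotomy r₁ r₂ with h | h | h
  · exact absurd (c2 r₁ a1 h) (not_le.mpr b1)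
  · exact h
  · exact absurd (c1 r₂ a2 h) (not_le.mpr b2)

theorem self_le_pow_int (x : Int) (m : Nat) (hx : 1 ≤ x) (hm : 1 ≤ m) : x ≤ x ^ m := by
  calc x = x ^ 1 := (pow_one x).symm
    _ ≤ x ^ m := pow_le_pow_right₀ hx hm

theorem loopA_spec (m : Nat) (p : Int) (hm : 1 ≤ m) :
    ∀ (fuel : Nat) (x : Int), 1 ≤ x → p + 2 ≤ x + fuel →
      x ≤ loopA m p x fuel ∧ p < (loopA m p x fuel) ^ m ∧
        ∀ y : Int, x ≤ y → y < loopA m p x fuel → y ^ m ≤ p := by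
  intro fuel
  induction fuel with
  | zero =>
    intro x hx hf
    simp only [loopA]
    refine ⟨le_refl x, ?_, fun y hy hylt => absurd hylt (not_lt.mpr hy)⟩
    have : p + 2 ≤ x := by simpa using hf
    have := self_le_pow_int x m hx hm
    omega
  | succ k ih =>
    intro x hx hf
    simp only [loopA]
    by_cases hc : x ^ m ≤ p
    · simp only [hc, if_true]
      have hrec := ih (x + 1) (by omega) (by push_cast at hf ⊢; omega)
      refine ⟨by omega, hrec.2.1, ?_⟩
      intro y hy hylt
      rcases eq_or_lt_of_le hy with h | h
      · simpa [← h] using hc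
      · exact hrec.2.2 y (by omega) hylt
    · simp only [hc, if_false]
      refine ⟨le_refl x, by omega, fun y hy hylt => absurd hylt (not_lt.mpr hy)⟩

theorem growB_spec (m : Nat) (p : Int) (hm : 1 ≤ m) :
    ∀ (fuel : Nat) (hi : Int), 1 ≤ hi → p + 2 ≤ hi + fuel →
      1 ≤ growB m p hi fuel ∧ p < (growB m p hi fuel) ^ m := by
  intro fuel
  induction fuel with
  | zero =>
    intro hi hhi hf
    simp only [growB]
    have : p + 2 ≤ hi := by simpa using hf
    have := self_le_pow_int hi m hhi hm
    exact ⟨hhi, by omega⟩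
  | succ k ih =>
    intro hi hhi hf
    simp only [growB]
    by_cases hc : hi ^ m ≤ p
    · simp only [hc, if_true]
      exact ih (hi * 2) (by omega) (by push_cast at hf ⊢; omega)
    · simp only [hc, if_false]
      exact ⟨hhi, by omega⟩

theorem bsB_spec (m : Nat) (p : Int) :
    ∀ (fuel : Nat) (lo hi : Int), 1 ≤ lo → lo ≤ hi → p < hi ^ m →
      (∀ y : Int, 1 ≤ y → y < lo → y ^ m ≤ p) → hi - lo ≤ (fuel : Int) →
      LeastExceed m p (bsB m p fuel lo hi) := by
  intro fuel
  induction fuel with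
  | zero =>
    intro lo hi hlo hlh hhi hbelow hf
    have : lo = hi := by simpa using by omega
    simp only [bsB]
    exact ⟨hlo, this ▸ hhi, hbelow⟩
  | succ k ih =>
    intro lo hi hlo hlh hhi hbelow hf
    simp only [bsB]
    by_cases hlt : lo < hi
    · simp only [hlt, if_true]
      have hmid : lo ≤ PySem.Int.floordiv (lo + hi) 2 ∧ PySem.Int.floordiv (lo + hi) 2 < hi := by
        rw [PySem.Int.floordiv_eq_ediv_of_pos (by omega : (0:Int) < 2)]
        omega
      set mid := PySem.Int.floordiv (lo + hi) 2 with hmiddef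
      by_cases hc : mid ^ m ≤ p
      · simp only [hc, if_true]
        refine ih (mid + 1) hi (by omega) (by omega) hhi ?_ (by push_cast at hf ⊢; omega)
        intro y hy hylt
        by_cases hylo : y < lo
        · exact hbelow y hy hylo
        · have : y ^ m ≤ mid ^ m :=
            pow_le_pow_left₀ (by omega : (0:Int) ≤ y) (by omega : y ≤ mid) m
          omega
      · simp only [hc, if_false]
        exact ih lo mid hlo (by omega) (by omega) hbelow (by push_cast at hf ⊢; omega)
    · simp only [hlt, if_false]
      have : lo = hi := by omega
      exact ⟨hlo, this ▸ hhi, hbelow⟩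

-- ===== VERDICT (by name: the statement is the Claim_ definition above) =====
theorem findMinimumValue_spec : Claim_equal_findMinimumValue := by
  intro n a _ hpre
  unfold Spec_findMinimumValue findMinimumValue findMinimumValue_alt
  set p := a.foldl (· * ·) 1 with hp
  simp only
  by_cases hlt : p < 1
  · rw [if_pos hlt]
    rcases h2 : (p + 2).toNat with _ | k
    · simp [loopA]
    · simp only [loopA, one_pow]
      rw [if_neg (by omega)]
  · rw [if_neg hlt]
    have hp1 : 1 ≤ p := by omega
    have hn : 1 ≤ n := by
      rcases hpre with h | h
      · exact h
      · rw [← hp] at h; omega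
    have hm : 1 ≤ n.toNat := by omega
    have hfuel : ((p + 2).toNat : Int) = p + 2 := Int.toNat_of_nonneg (by omega)
    have hA := loopA_spec n.toNat p hm (p + 2).toNat 1 (le_refl 1) (by omega)
    have hAle : LeastExceed n.toNat p (loopA n.toNat p 1 (p + 2).toNat) :=
      ⟨hA.1, hA.2.1, hA.2.2⟩
    have hG := growB_spec n.toNat p hm (p + 2).toNat 2 (by omega) (by omega)
    set h := growB n.toNat p 2 (p + 2).toNat with hh
    have hfb : (h - 1 : Int) ≤ ((h - 1).toNat : Int) := Int.self_le_toNat _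
    have hB := bsB_spec n.toNat p (h - 1).toNat 1 h (le_refl 1) hG.1 hG.2
      (fun y hy hylt => absurd hylt (not_lt.mpr hy)) (by omega)
    exact leastExceed_unique n.toNat p _ _ hAle hB

theorem pvWitness_ok :
    Dom_findMinimumValue pvWitness_findMinimumValue.1 pvWitness_findMinimumValue.2 ∧
    Pre_findMinimumValue pvWitness_findMinimumValue.1 pvWitness_findMinimumValue.2 := by
  decide
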